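-- pv_equiv track=rewrite | github.com/dacodekid/dacodekid.com | docs/snippet/code-signal/arcade/intro/exploring-the-water/add-border/add-border.py | add_border_v1
-- ===== SOURCE A (Python) =====
-- def add_border_v1(picture):
--     length = len(picture)
--     width = len(picture[0])
--     frame = [['*'] * (width + 2) for _ in range(length + 2)]
--     new_picture = []
--
--     for i in range(length):
--         for j in range(width):
--             frame[i + 1][j + 1] = picture[i][j]
--
--     for i in range(length + 2):
--         new_picture.append(''.join(frame[i]))
--
--     return new_picture
-- ===== SOURCE B (Python) =====
-- def add_border_v1(picture):
--     width = len(picture[0])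
--     border = '*' * (width + 2)
--     return [border] + ['*' + row[:width] + '*' for row in picture] + [border]
-- ===== Notes on version B (the rewrite author's own statement) =====
-- stated objective: simpler
-- what changed: B drops A's pre-allocated (length+2)x(width+2) star matrix, the nested cell-by-cell copy loop and the join pass, and instead builds the result in one pass over the rows as [border] + ['*'+row[:width]+'*' for each row] + [border].
import Mathlib
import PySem

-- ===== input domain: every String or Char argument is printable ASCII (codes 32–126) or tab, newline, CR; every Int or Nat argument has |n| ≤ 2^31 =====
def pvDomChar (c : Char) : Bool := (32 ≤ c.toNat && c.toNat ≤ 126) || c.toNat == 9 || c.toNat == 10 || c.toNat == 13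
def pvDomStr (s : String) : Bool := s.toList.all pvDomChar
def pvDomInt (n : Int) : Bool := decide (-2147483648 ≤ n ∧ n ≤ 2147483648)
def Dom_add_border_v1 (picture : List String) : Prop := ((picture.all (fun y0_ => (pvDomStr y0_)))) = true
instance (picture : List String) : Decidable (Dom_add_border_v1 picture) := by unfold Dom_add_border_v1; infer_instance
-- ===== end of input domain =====

-- B replaces A's pre-allocated (length+2)×(width+2) star matrix and nested cell-by-cell fill
-- with one pass over the rows: a border string plus '*' + row + '*' per row (objective: simpler).

-- ===== PORT A =====
-- literal transliteration of A: build the all-star frame, copy each cell picture[i][j] into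
-- frame[i+1][j+1] (pySetD/pyGetD are the total forms of the subscripts; Pre_ keeps every index
-- in range), then join each row of chars (''.join over single-char strings = String.mk).
def add_border_v1 (picture : List String) : List String :=
  let length : Int := PySem.List.len picture
  let width : Int := PySem.Str.len ((PySem.List.pyGet? picture 0).getD "")  -- picture[0]: raises on empty picture, excluded by Pre_
  let frame : List (List Char) :=
    (PySem.List.pyRange 0 (length + 2) 1).map (fun _ => List.replicate (width + 2).toNat '*')
  let frame2 : List (List Char) :=
    (PySem.List.pyRange 0 length 1).foldl (fun fr i =>
      (PySem.List.pyRange 0 width 1).foldl (fun fr j =>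
        PySem.List.pySetD fr (i + 1)
          (PySem.List.pySetD (PySem.List.pyGetD fr (i + 1) []) (j + 1)
            (PySem.List.pyGetD (PySem.List.pyGetD picture i "").toList j '*'))) fr) frame
  (PySem.List.pyRange 0 (length + 2) 1).foldl (fun acc i =>
    acc ++ [String.mk (PySem.List.pyGetD frame2 i [])]) []

-- ===== PORT B =====
-- literal transliteration of Source B: border = '*' * (width+2); [border] + ['*'+row[:width]+'*' …] + [border]
-- ('*' + row[:width] + '*' built as String.mk over the char list, row[:width] = PySem.List.slice).
def add_border_v1_alt (picture : List String) : List String :=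
  let width : Int := PySem.Str.len ((PySem.List.pyGet? picture 0).getD "")
  let border : String := String.mk (List.replicate (width + 2).toNat '*')
  ([border] ++ picture.map (fun row =>
    String.mk ('*' :: PySem.List.slice row.toList none (some width) ++ ['*']))) ++ [border]

-- ===== PRECONDITION & SPEC =====
-- Pre_ is exactly where A returns: it excludes the empty picture (A raises IndexError on
-- picture[0]) and pictures with a row shorter than the first row (A raises IndexError copying it).
def Pre_add_border_v1 (picture : List String) : Prop :=
  picture ≠ [] ∧ ∀ s ∈ picture, (picture.headD "").toList.length ≤ s.toList.length
instance (picture : List String) : Decidable (Pre_add_border_v1 picture) := by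
  unfold Pre_add_border_v1; infer_instance
def pvWitness_add_border_v1 : List String := ["ab", "c*"]

def Spec_add_border_v1 (picture : List String) (out : List String) : Prop := out = add_border_v1_alt picture
instance (picture : List String) (out : List String) : Decidable (Spec_add_border_v1 picture out) := by unfold Spec_add_border_v1; infer_instance

-- ===== CLAIM (what is proved, stated in full; the proofs are below) =====
def Claim_equal_add_border_v1 : Prop := ∀ (picture : List String), Dom_add_border_v1 picture → Pre_add_border_v1 picture → Spec_add_border_v1 picture (add_border_v1 picture)

-- ===== LEMMAS AND PROOFS =====

-- a fold over range(n) as an Int pyRange is the same fold over Nat indices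
theorem foldl_pyRange_zero_nat {α : Type} (n : Nat) (f : α → Int → α) (init : α) :
    (PySem.List.pyRange 0 (n : Int) 1).foldl f init
      = (List.range n).foldl (fun a (k : Nat) => f a (k : Int)) init := by
  rw [PySem.List.pyRange_one]
  simp only [sub_zero, Int.toNat_natCast, zero_add]
  rw [List.foldl_map]

-- a constant comprehension over range(n) is a replicate
theorem map_const_pyRange {α : Type} (n : Nat) (c : α) :
    (PySem.List.pyRange 0 (n : Int) 1).map (fun _ => c) = List.replicate n c := by
  rw [PySem.List.pyRange_one]
  simp [Function.comp_def]

-- '[f(xs[i]) for i in range(len(xs))]' is 'map f xs'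
theorem map_getD_range {α β : Type} (xs : List α) (d : α) (g : α → β) :
    (List.range xs.length).map (fun i => g (xs.getD i d)) = xs.map g := by
  apply List.ext_getElem (by simp)
  intro k hk hk'
  simp only [List.getElem_map, List.getElem_range]
  congr 1
  simp_all [List.getD]

theorem pySetD_cast_succ {α : Type} (xs : List α) (i : Nat) (v : α) :
    PySem.List.pySetD xs ((i : Int) + 1) v = xs.set (i + 1) v := by
  have h : ((i : Int) + 1) = ((i + 1 : Nat) : Int) := by push_cast; ring
  rw [h, PySem.List.pySetD_natCast]

theorem pyGetD_cast_succ {α : Type} (xs : List α) (i : Nat) (d : α) :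
    PySem.List.pyGetD xs ((i : Int) + 1) d = xs.getD (i + 1) d := by
  have h : ((i : Int) + 1) = ((i + 1 : Nat) : Int) := by push_cast; ring
  rw [h, PySem.List.pyGetD_natCast]

-- a replicate row with both ends split off
theorem rep_split {α : Type} (n : Nat) (a : α) :
    List.replicate (n + 2) a = a :: (List.replicate n a ++ [a]) := by
  rw [show n + 2 = (n + 1) + 1 from rfl, List.replicate_succ, List.replicate_succ']

-- getD through map String.toList, at every index
theorem getD_map_toList (l : List String) (i : Nat) :
    (l.map String.toList).getD i [] = (l.getD i "").toList := by
  rcases Nat.lt_or_ge i l.length with h | h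
  · simp [List.getD, List.getElem?_map, List.getElem?_eq_getElem h]
  · simp [List.getD, h]

-- inner loop: filling positions 1..cs.length of an all-star row with cs
theorem fill_row_aux (cs : List Char) (W n : Nat) (hn : n ≤ W) (hcs : n ≤ cs.length) :
    (List.range n).foldl (fun row (j : Nat) => row.set (j + 1) (cs.getD j '*'))
      ('*' :: (List.replicate W '*' ++ ['*']))
    = '*' :: ((cs.take n ++ List.replicate (W - n) '*') ++ ['*']) := by
  induction n with
  | zero => simp
  | succ m ih =>
    rw [List.range_succ, List.foldl_append, ih (by omega) (by omega)]
    simp only [List.foldl_cons, List.foldl_nil, List.set_cons_succ]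
    have hm : m < cs.length := by omega
    have hrep : List.replicate (W - m) '*' = '*' :: List.replicate (W - (m+1)) '*' := by
      have h : W - m = (W - (m+1)) + 1 := by omega
      rw [h, List.replicate_succ]
    have hlen : (cs.take m).length = m := by simp [hm.le]
    rw [List.append_assoc, List.set_append_right _ _ (by omega), hrep]
    simp only [hlen, Nat.sub_self]
    rw [List.set_append_left _ _ (by simp), List.set_cons_zero, List.getD_eq_getElem _ _ hm,
      List.take_succ_eq_append_getElem hm, List.append_assoc, List.append_assoc]
    rfl

theorem fill_row (cs : List Char) (w : Nat) (hw : w ≤ cs.length) :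
    (List.range w).foldl (fun row (j : Nat) => row.set (j + 1) (cs.getD j '*'))
      ('*' :: (List.replicate w '*' ++ ['*']))
    = '*' :: cs.take w ++ ['*'] := by
  rw [fill_row_aux cs w w le_rfl hw]
  simp

-- a fold that only edits slot k of the frame is a single edit of slot k
theorem foldl_set_slot {α : Type} (u : Nat → List α → List α) (k m : Nat)
    (fr : List (List α)) :
    (List.range m).foldl (fun fr (j : Nat) => fr.set k (u j (fr.getD k []))) fr
      = fr.set k ((List.range m).foldl (fun row j => u j row) (fr.getD k [])) := by
  by_cases hk : k < fr.length
  · induction m with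
    | zero => simp only [List.range_zero, List.foldl_nil, List.getD_eq_getElem _ _ hk,
        List.set_getElem_self hk]
    | succ m ih =>
      simp only [List.range_succ, List.foldl_append, List.foldl_cons, List.foldl_nil]
      rw [ih]
      have hget : ((fr.set k ((List.range m).foldl (fun row j => u j row) (fr.getD k []))).getD k [])
          = (List.range m).foldl (fun row j => u j row) (fr.getD k []) := by
        simp [List.getD, hk]
      rw [hget, List.set_set]
  · have hid : ∀ (v : List α), fr.set k v = fr := fun v =>
      List.set_eq_of_length_le (by omega)
    induction m with
    | zero => simp [hid]
    | succ m ih =>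
      simp only [List.range_succ, List.foldl_append, List.foldl_cons, List.foldl_nil]
      rw [ih, hid, hid, hid]

-- star border row split as cons/append
theorem star_row (w : Nat) : List.replicate (w + 2) '*' = '*' :: (List.replicate w '*' ++ ['*']) :=
  rep_split w '*'

-- outer loop: each step installs one bordered row into the still-starry frame
theorem outer_fill (w : Nat) (rows : List (List Char)) (hall : ∀ cs ∈ rows, w ≤ cs.length)
    (done : List (List Char)) :
    (List.range rows.length).foldl
      (fun fr (i : Nat) =>
        fr.set (done.length + i + 1)
          ((List.range w).foldl (fun row (j : Nat) => row.set (j + 1) ((rows.getD i []).getD j '*'))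
            (fr.getD (done.length + i + 1) [])))
      (List.replicate (w + 2) '*' :: (done ++ (List.replicate rows.length (List.replicate (w + 2) '*') ++ [List.replicate (w + 2) '*'])))
    = List.replicate (w + 2) '*' :: (done ++ (rows.map (fun cs => '*' :: cs.take w ++ ['*']) ++ [List.replicate (w + 2) '*'])) := by
  induction rows generalizing done with
  | nil => simp
  | cons cs rest ih =>
    have hcs : w ≤ cs.length := hall cs (by simp)
    rw [List.length_cons, List.range_succ_eq_map]
    simp only [List.foldl_cons, List.foldl_map, Nat.add_zero, List.getD_cons_zero, Nat.succ_eq_add_one]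
    rw [show List.replicate (rest.length + 1) (List.replicate (w + 2) '*')
          = List.replicate (w + 2) '*' :: List.replicate rest.length (List.replicate (w + 2) '*')
        from List.replicate_succ]
    have hget : (List.replicate (w + 2) '*' :: (done ++ (List.replicate (w + 2) '*' :: List.replicate rest.length (List.replicate (w + 2) '*') ++ [List.replicate (w + 2) '*']))).getD (done.length + 1) []
        = List.replicate (w + 2) '*' := by
      rw [List.getD_cons_succ]
      simp [List.getD]
    rw [hget]
    have hfill : (List.range w).foldl (fun row (j : Nat) => row.set (j + 1) (cs.getD j '*')) (List.replicate (w + 2) '*')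
        = '*' :: cs.take w ++ ['*'] := by
      rw [star_row, fill_row cs w hcs]
    rw [hfill]
    have hset : (List.replicate (w + 2) '*' :: (done ++ (List.replicate (w + 2) '*' :: List.replicate rest.length (List.replicate (w + 2) '*') ++ [List.replicate (w + 2) '*']))).set (done.length + 1) ('*' :: cs.take w ++ ['*'])
        = List.replicate (w + 2) '*' :: ((done ++ ['*' :: cs.take w ++ ['*']]) ++ (List.replicate rest.length (List.replicate (w + 2) '*') ++ [List.replicate (w + 2) '*'])) := by
      rw [List.set_cons_succ, List.set_append_right _ _ le_rfl]
      simp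
    rw [hset]
    have hih := ih (fun c hc => hall c (by simp [hc])) (done ++ ['*' :: cs.take w ++ ['*']])
    have hlen' : (done ++ ['*' :: cs.take w ++ ['*']]).length = done.length + 1 := by simp
    rw [hlen'] at hih
    have hfun : (fun (fr : List (List Char)) (i : Nat) =>
        fr.set (done.length + (i + 1) + 1)
          ((List.range w).foldl (fun row (j : Nat) => row.set (j + 1) (((cs :: rest).getD (i + 1) []).getD j '*'))
            (fr.getD (done.length + (i + 1) + 1) [])))
        = (fun (fr : List (List Char)) (i : Nat) =>
        fr.set (done.length + 1 + i + 1)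
          ((List.range w).foldl (fun row (j : Nat) => row.set (j + 1) ((rest.getD i []).getD j '*'))
            (fr.getD (done.length + 1 + i + 1) []))) := by
      funext fr i
      have hidx : done.length + (i + 1) + 1 = done.length + 1 + i + 1 := by omega
      rw [List.getD_cons_succ, hidx]
    rw [hfun, ← List.append_assoc done, hih]
    simp

-- ===== VERDICT (by name: the statement is the Claim_ definition above) =====
theorem add_border_v1_spec : Claim_equal_add_border_v1 := by
  unfold Claim_equal_add_border_v1
  intro picture _ hPre
  obtain ⟨hne, hall⟩ := hPre
  obtain ⟨p, ps, rfl⟩ := List.exists_cons_of_ne_nil hne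
  unfold Spec_add_border_v1 add_border_v1 add_border_v1_alt
  simp only [PySem.List.pyGet?_zero_cons, Option.getD_some, PySem.Str.len_eq, PySem.List.len_eq]
  rw [show (((p.toList.length : Int)) + 2).toNat = p.toList.length + 2 from by omega]
  rw [show ((((p :: ps).length : Int)) + 2) = (((p :: ps).length + 2 : Nat) : Int) from by push_cast; ring]
  rw [map_const_pyRange]
  simp only [foldl_pyRange_zero_nat]
  simp only [pySetD_cast_succ, pyGetD_cast_succ, PySem.List.pyGetD_natCast]
  have hbody : (fun (fr : List (List Char)) (i : Nat) =>
      (List.range p.toList.length).foldl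
        (fun (fr2 : List (List Char)) (j : Nat) =>
          fr2.set (i + 1) ((fr2.getD (i + 1) []).set (j + 1) (((p :: ps).getD i "").toList.getD j '*'))) fr)
      = (fun (fr : List (List Char)) (i : Nat) =>
      fr.set (i + 1)
        ((List.range p.toList.length).foldl
          (fun row (j : Nat) => row.set (j + 1) ((((p :: ps).map String.toList).getD i []).getD j '*'))
          (fr.getD (i + 1) []))) := by
    funext fr i
    rw [foldl_set_slot (fun j row => row.set (j + 1) (((p :: ps).getD i "").toList.getD j '*')) (i + 1) p.toList.length fr]
    rw [getD_map_toList]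
  rw [hbody]
  simp only [PySem.List.slice_to_natCast]
  have hall' : ∀ cs ∈ (p :: ps).map String.toList, p.toList.length ≤ cs.length := by
    intro cs hc
    obtain ⟨s, hs, rfl⟩ := List.mem_map.mp hc
    simpa using hall s hs
  have hout := outer_fill p.toList.length ((p :: ps).map String.toList) hall' []
  simp only [List.length_nil, Nat.zero_add, List.nil_append, List.length_map] at hout
  rw [show List.replicate ((p :: ps).length + 2) (List.replicate (p.toList.length + 2) '*')
        = List.replicate (p.toList.length + 2) '*' :: (List.replicate (p :: ps).length (List.replicate (p.toList.length + 2) '*') ++ [List.replicate (p.toList.length + 2) '*'])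
      from rep_split _ _]
  rw [hout]
  rw [PySem.List.foldl_append_singleton_eq_map]
  rw [show (p :: ps).length + 2
        = (List.replicate (p.toList.length + 2) '*' :: (((p :: ps).map String.toList).map (fun cs => '*' :: cs.take p.toList.length ++ ['*']) ++ [List.replicate (p.toList.length + 2) '*'])).length
      from by simp]
  rw [map_getD_range _ [] String.mk]
  simp [List.map_map, Function.comp_def]
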